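-- pv_equiv track=rewrite | github.com/Coleridge-Initiative/rc-kaggle-models | 7th Hayk Sargsyan/lib/utils.py | is_org_like
-- ===== SOURCE A (Python) =====
-- def is_dataset_like(title, cands):
--     if len(title.split()) < 3:
--         return False
--     keywords = ['survey', 'study', 'initiative', 'program', 'programme',
--                 'assessment', 'database', 'data base', 'data set',
--                 'dataset', 'data']
--     for key in keywords:
--         if title.lower().endswith(key):
--             if ('institute of' in title.lower() or
--                 'association of' in title.lower() or
--                 'institute for' in title.lower() or
--                 'association for' in title.lower() or
--                     'institute on' in title.lower() or
--                     'association on' in title.lower()):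
--                 return False
--             return True
--         if (f'{key} of ' in title.lower() or
--                 f'{key} on ' in title.lower() or
--                 f'{key} for ' in title.lower()):
--             if ('institute of' in title.lower() or
--                 'association of' in title.lower() or
--                 'institute for' in title.lower() or
--                 'association for' in title.lower() or
--                     'institute on' in title.lower() or
--                     'association on' in title.lower()):
--                 return False
--             return True
--     for key in keywords:
--         if any([cand.lower().endswith(f' key') for cand in cands]):
--             return True
--     return False
--
-- def is_org_like(candidate):
--     if len(candidate.split()) == 1:
--         return False
--     if 'data' in candidate and not candidate.endswith('center'):
--         return False
--     keywords = ['institute', 'institute', 'center', 'foundation',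
--                 'organisation', 'administration', 'organizations',
--                 'alliance', 'clinics', 'institut', 'institutes', 'society',
--                 'centers', 'unit', 'collaboration', 'bureau', 'university',
--                 'service', 'department', 'divisiion', 'agency',
--                 'office', 'library', 'organization', 'board', 'council',
--                 'union', 'college', 'committee', 'consortium',
--                 'association', 'clinic', 'hospital', 'laboratory',
--                 'centre', 'ministry', 'panel', 'school', 'schools',
--                 'facility', 'commission', 'league', 'taskforce',
--                 'register', 'insurance']
--
--     if any([candidate.endswith(keyword) for keyword in keywords]):
--         if not is_dataset_like(candidate.lower(), [candidate.lower()]):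
--             return True
--         else:
--             return False
--     if any([f'{keyword} of' in candidate for keyword in keywords]):
--         if not is_dataset_like(candidate.lower(), [candidate.lower()]):
--             return True
--         else:
--             return False
--     if any([f'{keyword} on' in candidate for keyword in keywords]):
--         if not is_dataset_like(candidate.lower(), [candidate.lower()]):
--             return True
--     if any([f'{keyword} for' in candidate for keyword in keywords]):
--         if not is_dataset_like(candidate.lower(), [candidate.lower()]):
--             return True
--     return False
-- ===== SOURCE B (Python) =====
-- _ORG_KW_LIST = ['institute', 'institute', 'center', 'foundation',
--                 'organisation', 'administration', 'organizations',
--                 'alliance', 'clinics', 'institut', 'institutes', 'society',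
--                 'centers', 'unit', 'collaboration', 'bureau', 'university',
--                 'service', 'department', 'divisiion', 'agency',
--                 'office', 'library', 'organization', 'board', 'council',
--                 'union', 'college', 'committee', 'consortium',
--                 'association', 'clinic', 'hospital', 'laboratory',
--                 'centre', 'ministry', 'panel', 'school', 'schools',
--                 'facility', 'commission', 'league', 'taskforce',
--                 'register', 'insurance']
-- _ORG_KWS = frozenset(_ORG_KW_LIST)
-- _ORG_LENS = frozenset(len(k) for k in _ORG_KW_LIST)
--
-- _DS_KW_LIST = ['survey', 'study', 'initiative', 'program', 'programme',
--                'assessment', 'database', 'data base', 'data set',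
--                'dataset', 'data']
-- _DS_KWS = frozenset(_DS_KW_LIST)
-- _DS_LENS = frozenset(len(k) for k in _DS_KW_LIST)
--
-- _INST_PATS = ('institute of', 'association of', 'institute for',
--               'association for', 'institute on', 'association on')
--
--
-- def _ends_with_any(s, kws, lens):
--     # suffix lookup in a hash set, one probe per distinct keyword length
--     return any(s[-L:] in kws for L in lens)
--
--
-- def _connector_scan(s, markers, kws, lens):
--     # one left-to-right scan: at each connector occurrence, test whether the
--     # text before it ends in a keyword
--     for i in range(len(s)):
--         if s.startswith(markers, i) and _ends_with_any(s[:i], kws, lens):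
--             return True
--     return False
--
--
-- def _dataset_like(t):
--     # t is the lowercased candidate
--     if len(t.split()) < 3:
--         return False
--     if (_ends_with_any(t, _DS_KWS, _DS_LENS) or
--             _connector_scan(t, (' of ', ' on ', ' for '), _DS_KWS, _DS_LENS)):
--         return not any(p in t for p in _INST_PATS)
--     return t.endswith(' key')
--
--
-- def is_org_like(candidate):
--     if len(candidate.split()) == 1:
--         return False
--     if 'data' in candidate and not candidate.endswith('center'):
--         return False
--     if (_ends_with_any(candidate, _ORG_KWS, _ORG_LENS) or
--             _connector_scan(candidate, (' of', ' on', ' for'), _ORG_KWS, _ORG_LENS)):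
--         return not _dataset_like(candidate.lower())
--     return False
-- ===== Notes on version B (the rewrite author's own statement) =====
-- stated objective: alternative
-- what changed: B replaces A's ~180 per-keyword substring scans (endswith plus the of/on/for-connector patterns for each keyword, repeated across four branches) by a single left-to-right positional scan that looks for a connector marker (space-of / space-on / space-for) and, at each occurrence, tests whether the text before the marker ends in a keyword via one hash-set suffix probe per distinct keyword length; the trailing-keyword test uses the same suffix hash-set instead of a keyword loop, and the dataset test is invoked at most once.
import Mathlib
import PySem

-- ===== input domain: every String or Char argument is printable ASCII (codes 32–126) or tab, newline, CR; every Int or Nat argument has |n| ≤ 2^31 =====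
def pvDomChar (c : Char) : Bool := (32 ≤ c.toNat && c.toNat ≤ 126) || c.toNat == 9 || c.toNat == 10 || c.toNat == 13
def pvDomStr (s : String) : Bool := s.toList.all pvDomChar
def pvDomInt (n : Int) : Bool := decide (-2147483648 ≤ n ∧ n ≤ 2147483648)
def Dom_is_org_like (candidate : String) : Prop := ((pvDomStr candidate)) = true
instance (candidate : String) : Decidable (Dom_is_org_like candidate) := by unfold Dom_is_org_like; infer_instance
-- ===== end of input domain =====

-- B replaces A's per-keyword substring scans by one positional scan for the connector
-- markers ' of'/' on'/' for' plus hash-set suffix lookups (objective: alternative).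

-- ===== PORT A =====
def pvDsKeywords : List String :=
  ["survey", "study", "initiative", "program", "programme",
   "assessment", "database", "data base", "data set",
   "dataset", "data"]

def pvDsInst (title : String) : Bool :=
  PySem.Str.isIn "institute of" (PySem.Str.lower title) ||
  PySem.Str.isIn "association of" (PySem.Str.lower title) ||
  PySem.Str.isIn "institute for" (PySem.Str.lower title) ||
  PySem.Str.isIn "association for" (PySem.Str.lower title) ||
  PySem.Str.isIn "institute on" (PySem.Str.lower title) ||
  PySem.Str.isIn "association on" (PySem.Str.lower title)

-- first 'for key in keywords' loop of is_dataset_like (some = early return)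
def pvDsLoop1 (title : String) : List String → Option Bool
  | [] => none
  | k :: rest =>
    if PySem.Str.endswith (PySem.Str.lower title) k then
      some (if pvDsInst title then false else true)
    else if PySem.Str.isIn (k ++ " of ") (PySem.Str.lower title) ||
            PySem.Str.isIn (k ++ " on ") (PySem.Str.lower title) ||
            PySem.Str.isIn (k ++ " for ") (PySem.Str.lower title) then
      some (if pvDsInst title then false else true)
    else pvDsLoop1 title rest

-- second 'for key in keywords' loop of is_dataset_like
def pvDsLoop2 (cands : List String) : List String → Bool
  | [] => false
  | _ :: rest =>
    if cands.any (fun c => PySem.Str.endswith (PySem.Str.lower c) " key") then true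
    else pvDsLoop2 cands rest

def is_dataset_like (title : String) (cands : List String) : Bool :=
  if (PySem.Str.split₀ title).length < 3 then false
  else
    (pvDsLoop1 title pvDsKeywords).getD (pvDsLoop2 cands pvDsKeywords)

def pvOrgKeywords : List String :=
  ["institute", "institute", "center", "foundation",
   "organisation", "administration", "organizations",
   "alliance", "clinics", "institut", "institutes", "society",
   "centers", "unit", "collaboration", "bureau", "university",
   "service", "department", "divisiion", "agency",
   "office", "library", "organization", "board", "council",
   "union", "college", "committee", "consortium",
   "association", "clinic", "hospital", "laboratory",
   "centre", "ministry", "panel", "school", "schools",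
   "facility", "commission", "league", "taskforce",
   "register", "insurance"]

def is_org_like (candidate : String) : Bool :=
  if (PySem.Str.split₀ candidate).length == 1 then false
  else if PySem.Str.isIn "data" candidate && !(PySem.Str.endswith candidate "center") then false
  else if pvOrgKeywords.any (fun k => PySem.Str.endswith candidate k) then
    (if !(is_dataset_like (PySem.Str.lower candidate) [PySem.Str.lower candidate]) then true else false)
  else if pvOrgKeywords.any (fun k => PySem.Str.isIn (k ++ " of") candidate) then
    (if !(is_dataset_like (PySem.Str.lower candidate) [PySem.Str.lower candidate]) then true else false)
  else if pvOrgKeywords.any (fun k => PySem.Str.isIn (k ++ " on") candidate) &&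
          !(is_dataset_like (PySem.Str.lower candidate) [PySem.Str.lower candidate]) then true
  else if pvOrgKeywords.any (fun k => PySem.Str.isIn (k ++ " for") candidate) &&
          !(is_dataset_like (PySem.Str.lower candidate) [PySem.Str.lower candidate]) then true
  else false

-- ===== PORT B =====
-- _ORG_KWS = frozenset(_ORG_KW_LIST), _ORG_LENS = frozenset(len(k) for k in _ORG_KW_LIST)
def pvOrgKwSet : PySem.Set String := PySem.Set.ofList pvOrgKeywords
def pvOrgLens : PySem.Set Int := PySem.Set.ofList (pvOrgKeywords.map PySem.Str.len)
def pvDsKwSet : PySem.Set String := PySem.Set.ofList pvDsKeywords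
def pvDsLens : PySem.Set Int := PySem.Set.ofList (pvDsKeywords.map PySem.Str.len)
def pvInstPats : List String :=
  ["institute of", "association of", "institute for",
   "association for", "institute on", "association on"]

-- _ends_with_any: one suffix probe (s[-L:] in kws) per distinct keyword length
def pvEndsWithAny (s : String) (kws : List String) (lens : List Int) : Bool :=
  lens.any (fun L => kws.contains (PySem.Str.slice s (some (-L)) none))

-- _connector_scan: s.startswith(markers, i) is s[i:].startswith(m); s[:i] is the prefix
def pvConnectorScan (s : String) (markers kws : List String) (lens : List Int) : Bool :=
  (PySem.List.pyRange 0 (PySem.Str.len s) 1).any (fun i =>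
    markers.any (fun m =>
      PySem.Str.startswith (PySem.Str.slice s (some i) none) m) &&
    pvEndsWithAny (PySem.Str.slice s none (some i)) kws lens)

-- _dataset_like of Source B (t already lowercased by the caller)
def pvDsAlt (t : String) : Bool :=
  if (PySem.Str.split₀ t).length < 3 then false
  else if pvEndsWithAny t pvDsKwSet pvDsLens ||
          pvConnectorScan t [" of ", " on ", " for "] pvDsKwSet pvDsLens then
    !(pvInstPats.any (fun p => PySem.Str.isIn p t))
  else PySem.Str.endswith t " key"

def is_org_like_alt (candidate : String) : Bool :=
  if (PySem.Str.split₀ candidate).length == 1 then false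
  else if PySem.Str.isIn "data" candidate && !(PySem.Str.endswith candidate "center") then false
  else if pvEndsWithAny candidate pvOrgKwSet pvOrgLens ||
          pvConnectorScan candidate [" of", " on", " for"] pvOrgKwSet pvOrgLens then
    !(pvDsAlt (PySem.Str.lower candidate))
  else false

-- ===== PRECONDITION & SPEC =====
def Spec_is_org_like (candidate : String) (out : Bool) : Prop := out = is_org_like_alt candidate
instance (candidate : String) (out : Bool) : Decidable (Spec_is_org_like candidate out) := by unfold Spec_is_org_like; infer_instance

-- ===== CLAIM (what is proved, stated in full; the proofs are below) =====
def Claim_equal_is_org_like : Prop := ∀ (candidate : String), Dom_is_org_like candidate → Spec_is_org_like candidate (is_org_like candidate)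

-- ===== LEMMAS AND PROOFS =====

theorem pv_lowerChar_idem (c : Char) :
    PySem.Chars.lowerChar (PySem.Chars.lowerChar c) = PySem.Chars.lowerChar c := by
  simp only [PySem.Chars.lowerChar, PySem.Chars.isupper]
  by_cases h1 : 'A' ≤ c ∧ c ≤ 'Z'
  · have hA : (65 : Nat) ≤ c.toNat := by
      have := Char.le_def.mp h1.1; exact_mod_cast this
    have hZ : c.toNat ≤ 90 := by
      have := Char.le_def.mp h1.2; exact_mod_cast this
    have hv : c.toNat + 32 < 0xD800 := by omega
    have ht : (Char.ofNat (c.toNat + 32)).toNat = c.toNat + 32 := by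
      simp [Char.toNat_ofNat, Nat.isValidChar, hv]
    have hne : ¬ (Char.ofNat (c.toNat + 32) ≤ 'Z') := by
      intro h
      have := Char.le_def.mp h
      have h2 : (Char.ofNat (c.toNat + 32)).toNat ≤ 90 := by exact_mod_cast this
      rw [ht] at h2; omega
    simp [h1.1, h1.2, hne]
  · have h : ¬ ('A' ≤ c) ∨ ¬ (c ≤ 'Z') := by tauto
    rcases h with h | h <;> simp [h]

theorem pv_lower_idem (s : String) :
    PySem.Str.lower (PySem.Str.lower s) = PySem.Str.lower s := by
  apply String.toList_inj.mp
  simp [PySem.Chars.lower, List.map_map, Function.comp_def, pv_lowerChar_idem]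

theorem pv_if_not (b : Bool) : (if b = true then false else true) = !b := by
  cases b <;> rfl

theorem pv_any_or {α : Type} (l : List α) (p q : α → Bool) :
    (l.any fun x => p x || q x) = (l.any p || l.any q) := by
  induction l with
  | nil => rfl
  | cons a t ih =>
    rw [List.any_cons, List.any_cons, List.any_cons, ih]
    cases p a <;> cases q a <;> cases t.any p <;> cases t.any q <;> rfl

theorem pvDsLoop1_eq (title : String) (l : List String) :
    pvDsLoop1 title l =
      (if l.any (fun k => PySem.Str.endswith (PySem.Str.lower title) k ||
            (PySem.Str.isIn (k ++ " of ") (PySem.Str.lower title) ||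
             PySem.Str.isIn (k ++ " on ") (PySem.Str.lower title) ||
             PySem.Str.isIn (k ++ " for ") (PySem.Str.lower title)))
       then some (if pvDsInst title = true then false else true) else none) := by
  induction l with
  | nil => rfl
  | cons k rest ih =>
    rw [List.any_cons]
    simp only [pvDsLoop1]
    by_cases h1 : PySem.Str.endswith (PySem.Str.lower title) k = true
    · rw [if_pos h1, h1, Bool.true_or, Bool.true_or]; rfl
    · rw [Bool.not_eq_true] at h1
      rw [h1]
      simp only [Bool.false_eq_true, if_false, Bool.false_or]
      by_cases h2 : (PySem.Str.isIn (k ++ " of ") (PySem.Str.lower title) ||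
             PySem.Str.isIn (k ++ " on ") (PySem.Str.lower title) ||
             PySem.Str.isIn (k ++ " for ") (PySem.Str.lower title)) = true
      · rw [if_pos h2, h2, Bool.true_or]; rfl
      · rw [Bool.not_eq_true] at h2
        rw [h2]
        simp only [Bool.false_eq_true, if_false, Bool.false_or]
        exact ih

theorem pvDsLoop2_eq (cands : List String) (l : List String) (hl : l ≠ []) :
    pvDsLoop2 cands l = cands.any (fun c => PySem.Str.endswith (PySem.Str.lower c) " key") := by
  induction l with
  | nil => exact absurd rfl hl
  | cons k rest ih =>
    simp only [pvDsLoop2]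
    by_cases h : (cands.any fun c => PySem.Str.endswith (PySem.Str.lower c) " key") = true
    · rw [if_pos h, h]
    · rw [if_neg h]
      rcases rest with _ | ⟨r, rs⟩
      · rw [Bool.not_eq_true] at h
        simp only [pvDsLoop2]
        exact h.symm
      · exact ih (by simp)

theorem pv_branch (aE aO aN aF d : Bool) :
    (if aE = true then (if (!d) = true then true else false)
     else if aO = true then (if (!d) = true then true else false)
     else if (aN && !d) = true then true
     else if (aF && !d) = true then true
     else false) = ((aE || aO || aN || aF) && !d) := by
  cases aE <;> cases aO <;> cases aN <;> cases aF <;> cases d <;> rfl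

-- any over a dedup'd set equals any over the original list
theorem pv_any_ofList {α : Type} [BEq α] [LawfulBEq α] (l : List α) (p : α → Bool) :
    (PySem.Set.ofList l).any p = l.any p := by
  rw [Bool.eq_iff_iff, List.any_eq_true, List.any_eq_true]
  constructor
  · rintro ⟨x, hx, hp⟩; exact ⟨x, (PySem.Set.mem_ofList _ _).mp hx, hp⟩
  · rintro ⟨x, hx, hp⟩; exact ⟨x, (PySem.Set.mem_ofList _ _).mpr hx, hp⟩

-- the suffix-probe test equals the endswith scan
theorem pv_ends_eq (s : String) (kws : List String) (lens : List Int)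
    (h1 : ∀ k ∈ kws, ((k.toList.length : Nat) : Int) ∈ lens) (h2 : ∀ L ∈ lens, 0 < L) :
    pvEndsWithAny s kws lens = kws.any (fun k => PySem.Str.endswith s k) := by
  unfold pvEndsWithAny
  rw [Bool.eq_iff_iff, List.any_eq_true, List.any_eq_true]
  constructor
  · rintro ⟨L, hL, hc⟩
    have h0 := h2 L hL
    have hL' : L = ((L.toNat : Nat) : Int) := by omega
    rw [hL'] at hc
    have hmem : PySem.Str.slice s (some (-((L.toNat : Nat) : Int))) none ∈ kws := by
      simpa using hc
    refine ⟨_, hmem, ?_⟩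
    rw [PySem.Str.endswith_eq, PySem.Chars.endswith_iff]
    have ht : (PySem.Str.slice s (some (-((L.toNat : Nat) : Int))) none).toList
        = PySem.List.slice s.toList (some (-((L.toNat : Nat) : Int))) none := by
      simp [PySem.Str.toList_slice]
    rw [ht, PySem.List.slice_from_neg_natCast _ _ (by omega)]
    exact List.drop_suffix _ _
  · rintro ⟨k, hk, he⟩
    rw [PySem.Str.endswith_eq, PySem.Chars.endswith_iff] at he
    have hmemL := h1 k hk
    have h0 := h2 _ hmemL
    refine ⟨((k.toList.length : Nat) : Int), hmemL, ?_⟩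
    have heq : PySem.Str.slice s (some (-((k.toList.length : Nat) : Int))) none = k := by
      apply String.toList_inj.mp
      have ht : (PySem.Str.slice s (some (-((k.toList.length : Nat) : Int))) none).toList
          = PySem.List.slice s.toList (some (-((k.toList.length : Nat) : Int))) none := by
        simp [PySem.Str.toList_slice]
      rw [ht, PySem.List.slice_from_neg_natCast _ _ (by omega)]
      obtain ⟨u, hu⟩ := he
      rw [← hu]
      have hl : (u ++ k.toList).length - k.toList.length = u.length := by
        simp
      rw [hl, List.drop_left]
    rw [heq]
    simpa using hk

-- 'k ++ m' occurs in cs iff some position i splits it: prefix ends in k, rest starts with m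
theorem pv_infix_split (k m cs : List Char) (hm : m ≠ []) :
    (k ++ m) <:+: cs ↔ ∃ i < cs.length, m <+: cs.drop i ∧ k <:+ cs.take i := by
  constructor
  · rintro ⟨u, v, huv⟩
    refine ⟨u.length + k.length, ?_, ?_, ?_⟩
    · have hcs : cs.length = u.length + k.length + m.length + v.length := by
        rw [← huv]; simp; omega
      have hm1 : 0 < m.length := List.length_pos_iff.mpr hm
      omega
    · have hd : cs.drop (u.length + k.length) = m ++ v := by
        rw [← huv]
        have ha : u ++ (k ++ m) ++ v = (u ++ k) ++ (m ++ v) := by simp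
        rw [ha]
        have hl : (u ++ k).length = u.length + k.length := by simp
        rw [← hl, List.drop_left]
      rw [hd]; exact ⟨v, rfl⟩
    · have htk : cs.take (u.length + k.length) = u ++ k := by
        rw [← huv]
        have ha : u ++ (k ++ m) ++ v = (u ++ k) ++ (m ++ v) := by simp
        rw [ha]
        have hl : (u ++ k).length = u.length + k.length := by simp
        rw [← hl, List.take_left]
      rw [htk]; exact ⟨u, rfl⟩
  · rintro ⟨i, _, ⟨t, ht⟩, ⟨u, hu⟩⟩
    refine ⟨u, t, ?_⟩
    have ha : u ++ (k ++ m) ++ t = (u ++ k) ++ (m ++ t) := by simp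
    rw [ha, hu, ht, List.take_append_drop]

-- the connector scan equals the per-keyword infix scans
theorem pv_scan_eq (s : String) (markers kws : List String) (lens : List Int)
    (h1 : ∀ k ∈ kws, ((k.toList.length : Nat) : Int) ∈ lens) (h2 : ∀ L ∈ lens, 0 < L)
    (hm : ∀ mk ∈ markers, mk.toList ≠ []) :
    pvConnectorScan s markers kws lens =
      kws.any (fun k => markers.any (fun mk => PySem.Str.isIn (k ++ mk) s)) := by
  have hlen : PySem.Str.len s = (s.toList.length : Int) := by simp
  have hdrop : ∀ i : Nat, (PySem.Str.slice s (some ((i : Nat) : Int)) none).toList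
      = s.toList.drop i := by
    intro i; simp [PySem.Str.toList_slice, PySem.List.slice_from_natCast]
  have htake : ∀ i : Nat, (PySem.Str.slice s none (some ((i : Nat) : Int))).toList
      = s.toList.take i := by
    intro i; simp [PySem.Str.toList_slice, PySem.List.slice_to_natCast]
  unfold pvConnectorScan
  rw [Bool.eq_iff_iff, List.any_eq_true, List.any_eq_true]
  constructor
  · rintro ⟨i, hi, hcond⟩
    rw [PySem.List.mem_pyRange_one] at hi
    have hi' : i = ((i.toNat : Nat) : Int) := by omega
    rw [hi'] at hcond
    rw [Bool.and_eq_true] at hcond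
    obtain ⟨hmk, hends⟩ := hcond
    rw [pv_ends_eq _ kws lens h1 h2, List.any_eq_true] at hends
    obtain ⟨k, hk, hke⟩ := hends
    rw [List.any_eq_true] at hmk
    obtain ⟨mk, hmkm, hmks⟩ := hmk
    refine ⟨k, hk, ?_⟩
    rw [List.any_eq_true]
    refine ⟨mk, hmkm, ?_⟩
    rw [PySem.Str.isIn_eq, PySem.Chars.isIn_iff_infix]
    have hKM : (k ++ mk).toList = k.toList ++ mk.toList := by simp
    rw [hKM, pv_infix_split _ _ _ (hm mk hmkm)]
    rw [PySem.Str.startswith_eq, PySem.Chars.startswith_iff, hdrop] at hmks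
    rw [PySem.Str.endswith_eq, PySem.Chars.endswith_iff, htake] at hke
    refine ⟨i.toNat, ?_, hmks, hke⟩
    rw [hlen] at hi
    omega
  · rintro ⟨k, hk, hany⟩
    rw [List.any_eq_true] at hany
    obtain ⟨mk, hmkm, hin⟩ := hany
    rw [PySem.Str.isIn_eq, PySem.Chars.isIn_iff_infix] at hin
    have hKM : (k ++ mk).toList = k.toList ++ mk.toList := by simp
    rw [hKM, pv_infix_split _ _ _ (hm mk hmkm)] at hin
    obtain ⟨i, hilt, hpre, hsuf⟩ := hin
    refine ⟨((i : Nat) : Int), ?_, ?_⟩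
    · rw [PySem.List.mem_pyRange_one, hlen]
      omega
    · rw [Bool.and_eq_true]
      constructor
      · rw [List.any_eq_true]
        refine ⟨mk, hmkm, ?_⟩
        rw [PySem.Str.startswith_eq, PySem.Chars.startswith_iff, hdrop]
        exact hpre
      · rw [pv_ends_eq _ kws lens h1 h2, List.any_eq_true]
        refine ⟨k, hk, ?_⟩
        rw [PySem.Str.endswith_eq, PySem.Chars.endswith_iff, htake]
        exact hsuf

set_option maxRecDepth 8192 in
theorem pv_org_h1 : ∀ k ∈ pvOrgKwSet, ((k.toList.length : Nat) : Int) ∈ pvOrgLens := by decide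

set_option maxRecDepth 8192 in
theorem pv_org_h2 : ∀ L ∈ pvOrgLens, 0 < L := by decide

set_option maxRecDepth 8192 in
theorem pv_ds_h1 : ∀ k ∈ pvDsKwSet, ((k.toList.length : Nat) : Int) ∈ pvDsLens := by decide

set_option maxRecDepth 8192 in
theorem pv_ds_h2 : ∀ L ∈ pvDsLens, 0 < L := by decide

-- A's dataset test, applied as is_org_like applies it, equals B's scan-based one
theorem pv_ds_eq (t : String) (h : PySem.Str.lower t = t) :
    is_dataset_like t [t] = pvDsAlt t := by
  unfold is_dataset_like pvDsAlt
  by_cases hg : (PySem.Str.split₀ t).length < 3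
  · rw [if_pos hg, if_pos hg]
  · rw [if_neg hg, if_neg hg, pvDsLoop1_eq,
        pvDsLoop2_eq [t] pvDsKeywords (by simp [pvDsKeywords])]
    rw [pv_ends_eq _ _ _ pv_ds_h1 pv_ds_h2,
        pv_scan_eq _ _ _ _ pv_ds_h1 pv_ds_h2 (by decide)]
    unfold pvDsKwSet
    rw [pv_any_ofList, pv_any_ofList]
    simp only [pv_any_or, h, pvDsInst, pvInstPats, pv_if_not,
               List.any_cons, List.any_nil, Bool.or_false, Bool.or_assoc]
    split_ifs <;> simp_all

-- ===== VERDICT (by name: the statement is the Claim_ definition above) =====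
theorem is_org_like_spec : Claim_equal_is_org_like := by
  intro candidate _
  unfold Spec_is_org_like
  unfold is_org_like is_org_like_alt
  by_cases h1 : ((PySem.Str.split₀ candidate).length == 1) = true
  · rw [if_pos h1, if_pos h1]
  · rw [if_neg h1, if_neg h1]
    by_cases h2 : (PySem.Str.isIn "data" candidate && !(PySem.Str.endswith candidate "center")) = true
    · rw [if_pos h2, if_pos h2]
    · rw [if_neg h2, if_neg h2]
      rw [pv_ds_eq _ (pv_lower_idem candidate)]
      rw [pv_ends_eq _ _ _ pv_org_h1 pv_org_h2,
          pv_scan_eq _ _ _ _ pv_org_h1 pv_org_h2 (by decide)]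
      unfold pvOrgKwSet
      rw [pv_any_ofList, pv_any_ofList]
      rw [pv_branch]
      simp only [pv_any_or, List.any_cons, List.any_nil, Bool.or_false, Bool.or_assoc]
      split_ifs with hb
      · rw [hb, Bool.true_and]
      · rw [Bool.not_eq_true] at hb
        rw [hb, Bool.false_and]
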